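-- pv_equiv track=rewrite | github.com/jillvp/MITx_6.00.1x | Final Exam/Problem 5.py | uniqueValues
-- ===== SOURCE A (Python) =====
-- def uniqueValues(aDict):
--     '''
--     aDict: a dictionary
--     returns: a sorted list of keys that map to unique aDict values, empty list if none
--     '''
--     tmp = {}
--     result = []
--     for value in aDict.values():
--         if(value in tmp.keys()): tmp[value] += 1
--         else: tmp[value] = 1
--     for key in aDict.keys():
--         if(tmp[aDict[key]] == 1): result.append(key)
--     return sorted(result)
-- ===== SOURCE B (Python) =====
-- def uniqueValues(aDict):
--     '''
--     aDict: a dictionary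
--     returns: a sorted list of keys that map to unique aDict values, empty list if none
--     '''
--     items = sorted(aDict.items(), key=lambda kv: kv[1])
--
--     def scan(items):
--         # items is sorted by value, so equal values are one contiguous run
--         if not items:
--             return []
--         head, tail = items[0], items[1:]
--         i = 0
--         while i < len(tail) and tail[i][1] == head[1]:
--             i += 1
--         rest = scan(tail[i:])
--         return ([head[0]] + rest) if i == 0 else rest
--
--     return sorted(scan(items))
-- ===== Notes on version B (the rewrite author's own statement) =====
-- stated objective: alternative
-- what changed: B sorts the items by value and scans the sorted list recursively for singleton runs of equal values (emitting that run's key), instead of A's count-dict build followed by a second scan over all keys with a count lookup; no counting structure exists in B.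
import Mathlib
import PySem

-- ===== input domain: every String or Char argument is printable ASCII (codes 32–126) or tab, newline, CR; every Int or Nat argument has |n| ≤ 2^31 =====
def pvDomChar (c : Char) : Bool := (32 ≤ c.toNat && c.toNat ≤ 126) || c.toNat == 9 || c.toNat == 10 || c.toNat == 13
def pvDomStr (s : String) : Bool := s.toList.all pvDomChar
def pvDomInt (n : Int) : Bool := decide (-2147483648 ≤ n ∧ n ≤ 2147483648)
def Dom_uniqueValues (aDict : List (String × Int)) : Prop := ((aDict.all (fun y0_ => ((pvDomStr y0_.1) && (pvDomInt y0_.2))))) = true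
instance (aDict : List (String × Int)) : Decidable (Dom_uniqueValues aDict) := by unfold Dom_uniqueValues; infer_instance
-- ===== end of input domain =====

-- B sorts the items by value and recursively scans for singleton runs of equal values,
-- instead of A's count dict plus a second scan over all keys (objective: alternative algorithm).


-- ===== PORT A =====
-- 'tmp[value] += 1' and 'tmp[aDict[key]]' look up keys that are certainly present,
-- so Dict.modify / Dict.getD are exact here (no KeyError is reachable).
def uniqueValues (aDict : List (String × Int)) : List String :=
  let d := PySem.Dict.ofList aDict
  let tmp := d.values.foldl
      (fun t v => if t.contains v then t.modify v 0 (· + 1) else t.insert v 1)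
      (PySem.Dict.empty : PySem.Dict Int Int)
  let result := d.keys.foldl
      (fun r k => if tmp.getD (d.getD k 0) 0 == 1 then r ++ [k] else r) []
  PySem.List.sorted result (fun x => x) false

-- ===== PORT B =====
-- scan(items): head/tail split; the inner while counts i = the length of the run of
-- tail items equal in value to head, i.e. of 'tail.takeWhile (·.2 == head.2)', and
-- 'tail[i:]' is then exactly 'tail.dropWhile (·.2 == head.2)'.
def uvScan : List (String × Int) → List String
  | [] => []
  | x :: xs =>
    let rest := uvScan (xs.dropWhile (fun p => p.2 == x.2))
    if (xs.takeWhile (fun p => p.2 == x.2)).length == 0 then [x.1] ++ rest else rest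
termination_by l => l.length
decreasing_by exact Nat.lt_succ_of_le (List.length_dropWhile_le _ _)

def uniqueValues_alt (aDict : List (String × Int)) : List String :=
  let items := PySem.List.sorted (PySem.Dict.ofList aDict).items (fun kv => kv.2) false
  PySem.List.sorted (uvScan items) (fun x => x) false

-- ===== PRECONDITION & SPEC =====
def Spec_uniqueValues (aDict : List (String × Int)) (out : List String) : Prop := out = uniqueValues_alt aDict
instance (aDict : List (String × Int)) (out : List String) : Decidable (Spec_uniqueValues aDict out) := by unfold Spec_uniqueValues; infer_instance

-- ===== CLAIM (what is proved, stated in full; the proofs are below) =====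
def Claim_equal_uniqueValues : Prop := ∀ (aDict : List (String × Int)), Dom_uniqueValues aDict → Spec_uniqueValues aDict (uniqueValues aDict)

-- ===== LEMMAS AND PROOFS =====

-- A's counting step is exactly the Counter modify step.
theorem stepA_eq_modify (t : PySem.Dict Int Int) (v : Int) :
    (if t.contains v then t.modify v 0 (· + 1) else t.insert v 1) = t.modify v 0 (· + 1) := by
  split_ifs with h
  · rfl
  · have h0 : t.getD v 0 = 0 := PySem.Dict.getD_of_not_contains _ _ (by simpa using h)
    simp [PySem.Dict.modify, PySem.Dict.insert, h, h0]

-- A's tmp holds the multiplicity of each value.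
theorem tmpA_getD (vals : List Int) (v : Int) :
    (vals.foldl (fun t v => if t.contains v then t.modify v 0 (· + 1) else t.insert v 1)
      (PySem.Dict.empty : PySem.Dict Int Int)).getD v 0 = (vals.count v : Int) := by
  have h : (fun (t : PySem.Dict Int Int) v => if t.contains v then t.modify v 0 (· + 1) else t.insert v 1)
      = fun t v => t.modify v 0 (· + 1) := by
    funext t v; exact stepA_eq_modify t v
  rw [h, PySem.Dict.getD_foldl_modify_add_one]
  simp [PySem.Dict.getD_empty]

-- after dropping the run of value v from a value-sorted list whose items are all ≥ v,
-- every remaining item's value is strictly above v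
theorem dropWhile_gt (xs : List (String × Int)) (v : Int)
    (h : xs.Pairwise (fun a b => a.2 ≤ b.2)) (hge : ∀ p ∈ xs, v ≤ p.2) :
    ∀ p ∈ xs.dropWhile (fun q => q.2 == v), v < p.2 := by
  induction xs with
  | nil => simp
  | cons x xs ih =>
    by_cases hx : x.2 = v
    · rw [List.dropWhile_cons_of_pos (by simp [hx])]
      exact ih (List.Pairwise.of_cons h) (fun p hp => hge p (List.mem_cons_of_mem _ hp))
    · rw [List.dropWhile_cons_of_neg (by simp [hx])]
      intro p hp
      rcases List.mem_cons.mp hp with rfl | hp'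
      · exact lt_of_le_of_ne (hge p (List.mem_cons_self)) (fun e => hx e.symm)
      · exact lt_of_lt_of_le
          (lt_of_le_of_ne (hge x List.mem_cons_self) (fun e => hx e.symm))
          ((List.pairwise_cons.mp h).1 p hp')

-- on a list x :: (run of x's value ++ strictly-larger rest), the items whose value
-- occurs exactly once are x (iff its run is empty) plus those unique within the rest
theorem filter_split (x : String × Int) (t r : List (String × Int))
    (htv : ∀ p ∈ t, p.2 = x.2) (hrv : ∀ p ∈ r, x.2 < p.2) :
    (x :: (t ++ r)).filter (fun p => (x :: (t ++ r)).countP (fun q => q.2 == p.2) == 1)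
      = (if t.length == 0 then [x] else [])
        ++ r.filter (fun p => r.countP (fun q => q.2 == p.2) == 1) := by
  have hcx : (x :: (t ++ r)).countP (fun q => q.2 == x.2) = 1 + t.length := by
    simp only [List.countP_cons, List.countP_append]
    have h1 : t.countP (fun q => q.2 == x.2) = t.length :=
      List.countP_eq_length.mpr (fun p hp => by simp [htv p hp])
    have h2 : r.countP (fun q => q.2 == x.2) = 0 :=
      List.countP_eq_zero.mpr (fun p hp => by simp [(hrv p hp).ne'])
    simp [h1, h2]; omega
  have hft : t.filter (fun p => (x :: (t ++ r)).countP (fun q => q.2 == p.2) == 1) = [] := by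
    apply List.filter_eq_nil_iff.mpr
    intro p hp
    have hlen : 1 ≤ t.length := List.length_pos_of_mem hp
    rw [htv p hp]
    simp [hcx]
    exact List.ne_nil_of_length_pos (by omega)
  have hfr : r.filter (fun p => (x :: (t ++ r)).countP (fun q => q.2 == p.2) == 1)
      = r.filter (fun p => r.countP (fun q => q.2 == p.2) == 1) := by
    apply List.filter_congr
    intro p hp
    have h0 : (x.2 == p.2) = false := by simp [(hrv p hp).ne]
    have h1 : t.countP (fun q => q.2 == p.2) = 0 :=
      List.countP_eq_zero.mpr (fun q hq => by simp [htv q hq, (hrv p hp).ne])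
    simp only [List.countP_cons, List.countP_append, h0, h1]
    simp
  rw [List.filter_cons, List.filter_append, hft, hfr]
  by_cases h0 : t.length = 0
  · simp [hcx, h0]
  · have hC : ¬ ((x :: (t ++ r)).countP (fun q => q.2 == x.2) == 1) = true := by
      simp [hcx]
      exact List.ne_nil_of_length_pos (by omega)
    rw [if_neg hC]
    simp [h0]

-- the scan on a value-sorted list picks exactly the keys of items whose value occurs once
theorem uvScan_eq_filter_aux (n : Nat) : ∀ S : List (String × Int), S.length ≤ n →
    S.Pairwise (fun a b => a.2 ≤ b.2) →
    uvScan S = (S.filter (fun p => S.countP (fun q => q.2 == p.2) == 1)).map (·.1) := by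
  induction n with
  | zero =>
    intro S hlen _
    rw [List.length_eq_zero_iff.mp (Nat.le_zero.mp hlen)]
    simp [uvScan]
  | succ n ih =>
    intro S hlen h
    match S with
    | [] => simp [uvScan]
    | x :: xs =>
      have hpxs : xs.Pairwise (fun a b => a.2 ≤ b.2) := List.Pairwise.of_cons h
      have hge : ∀ p ∈ xs, x.2 ≤ p.2 := (List.pairwise_cons.mp h).1
      have htv : ∀ p ∈ xs.takeWhile (fun q => q.2 == x.2), p.2 = x.2 := by
        intro p hp; simpa using List.mem_takeWhile_imp hp
      have hrv : ∀ p ∈ xs.dropWhile (fun q => q.2 == x.2), x.2 < p.2 :=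
        dropWhile_gt xs x.2 hpxs hge
      have hpr : (xs.dropWhile (fun q => q.2 == x.2)).Pairwise (fun a b => a.2 ≤ b.2) :=
        hpxs.sublist (List.dropWhile_sublist _)
      have hIH : uvScan (xs.dropWhile (fun q => q.2 == x.2))
          = ((xs.dropWhile (fun q => q.2 == x.2)).filter
              (fun p => (xs.dropWhile (fun q => q.2 == x.2)).countP (fun q => q.2 == p.2) == 1)).map (·.1) :=
        ih _ (le_trans (List.length_dropWhile_le _ _) (Nat.le_of_succ_le_succ hlen)) hpr
      rw [uvScan]
      conv_rhs => rw [← List.takeWhile_append_dropWhile (p := fun q => q.2 == x.2) (l := xs)]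
      rw [filter_split x _ _ htv hrv, List.map_append, hIH]
      by_cases h0 : (xs.takeWhile (fun q => q.2 == x.2)).length = 0
      · simp [h0]
      · simp [h0]

theorem uvScan_eq_filter (S : List (String × Int))
    (h : S.Pairwise (fun a b => a.2 ≤ b.2)) :
    uvScan S = (S.filter (fun p => S.countP (fun q => q.2 == p.2) == 1)).map (·.1) :=
  uvScan_eq_filter_aux S.length S le_rfl h

-- keys of a value-sorted permutation of a dict's items are distinct
theorem uvScan_key_nodup (S : List (String × Int)) (hnd : (S.map (·.1)).Nodup)
    (h : S.Pairwise (fun a b => a.2 ≤ b.2)) : (uvScan S).Nodup := by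
  rw [uvScan_eq_filter S h]
  exact hnd.sublist (List.filter_sublist.map _)

-- membership in the scan result
theorem mem_uvScan (S : List (String × Int)) (h : S.Pairwise (fun a b => a.2 ≤ b.2)) (k : String) :
    k ∈ uvScan S ↔ ∃ v, (k, v) ∈ S ∧ S.countP (fun q => q.2 == v) = 1 := by
  rw [uvScan_eq_filter S h]
  constructor
  · intro hk
    obtain ⟨p, hpf, rfl⟩ := List.mem_map.mp hk
    have hp := List.mem_filter.mp hpf
    exact ⟨p.2, by simpa using hp.1, by simpa using hp.2⟩
  · rintro ⟨v, hmem, hcnt⟩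
    exact List.mem_map.mpr ⟨(k, v), List.mem_filter.mpr ⟨hmem, by simpa using hcnt⟩, rfl⟩

-- the two pre-sort result lists are permutations of each other
theorem result_perm (aDict : List (String × Int)) :
    ((PySem.Dict.ofList aDict).keys.filter (fun k =>
        (((PySem.Dict.ofList aDict).values.count ((PySem.Dict.ofList aDict).getD k 0) : Int) == 1))).Perm
    (uvScan (PySem.List.sorted (PySem.Dict.ofList aDict).items (fun kv => kv.2) false)) := by
  set d := PySem.Dict.ofList aDict with hd
  set S := PySem.List.sorted d.items (fun kv => kv.2) false with hS
  have hnd : d.keys.Nodup := PySem.Dict.nodup_keys_ofList aDict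
  have hperm : S.Perm d.items := PySem.List.sorted_perm _ _ _
  have hpair : S.Pairwise (fun a b => a.2 ≤ b.2) := PySem.List.sorted_pairwise _ _
  have hkeys : d.keys = d.items.map (·.1) := rfl
  have hvals : d.values = d.items.map (·.2) := rfl
  have hSnd : (S.map (·.1)).Nodup := ((hperm.map (·.1)).nodup_iff).mpr (hkeys ▸ hnd)
  have hcount : ∀ v : Int, S.countP (fun q => q.2 == v) = d.values.count v := by
    intro v
    rw [hperm.countP_eq, hvals, List.count_eq_countP, List.countP_map]
    rfl
  have hA : (d.keys.filter (fun k => ((d.values.count (d.getD k 0) : Int) == 1))).Nodup :=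
    hnd.filter _
  have hB : (uvScan S).Nodup := uvScan_key_nodup S hSnd hpair
  refine (List.perm_ext_iff_of_nodup hA hB).mpr ?_
  intro k
  rw [mem_uvScan S hpair k, List.mem_filter]
  constructor
  · rintro ⟨hk, hcnt⟩
    obtain ⟨kv, hkv, rfl⟩ := List.mem_map.mp (hkeys ▸ hk)
    have hget : d.getD kv.1 0 = kv.2 := PySem.Dict.getD_of_mem_items d hkv hnd 0
    rw [hget] at hcnt
    refine ⟨kv.2, hperm.mem_iff.mpr hkv, ?_⟩
    rw [hcount]
    simpa using hcnt
  · rintro ⟨v, hmem, hcnt⟩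
    have hitems : (k, v) ∈ d.items := hperm.mem_iff.mp hmem
    have hget : d.getD k 0 = v := PySem.Dict.getD_of_mem_items d hitems hnd 0
    rw [hcount] at hcnt
    refine ⟨hkeys ▸ List.mem_map.mpr ⟨(k, v), hitems, rfl⟩, ?_⟩
    simp [hget, hcnt]

-- ===== VERDICT (by name: the statement is the Claim_ definition above) =====
theorem uniqueValues_spec : Claim_equal_uniqueValues := by
  intro aDict _
  unfold Spec_uniqueValues uniqueValues uniqueValues_alt
  simp only []
  set d := PySem.Dict.ofList aDict with hd
  have hA : (d.keys.foldl
      (fun r k => if (d.values.foldl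
          (fun t v => if t.contains v then t.modify v 0 (· + 1) else t.insert v 1)
          (PySem.Dict.empty : PySem.Dict Int Int)).getD (d.getD k 0) 0 == 1 then r ++ [k] else r) ([] : List String))
      = d.keys.filter (fun k => ((d.values.count (d.getD k 0) : Int) == 1)) := by
    rw [PySem.List.foldl_append_if_eq_filter]
    simp only [List.nil_append]
    congr 1
    funext k
    rw [tmpA_getD d.values (d.getD k 0)]
  rw [hA]
  exact PySem.List.sorted_eq_sorted_of_perm _ _ _ (fun a b h => h) (result_perm aDict)
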